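-- pv_equiv track=rewrite | github.com/DaniGarPe/Curso_Python | CentrosNumericos.py | VerificarSiCentroNumerico
-- ===== SOURCE A (Python) =====
-- def VerificarSiCentroNumerico(p_candidato):
--   sumaIzq = 0
--   for numerosIzq in range(1, p_candidato):
--     sumaIzq = sumaIzq + numerosIzq
--
--   numeroDerecha = p_candidato + 1
--
--   while sumaIzq > 0:
--     sumaIzq = sumaIzq - numeroDerecha
--     numeroDerecha = numeroDerecha + 1
--
--   if sumaIzq == 0:
--     return True
--   else:
--     return False
-- ===== SOURCE B (Python) =====
-- def _isqrt(m):
--     # floor integer square root via Newton's method (m >= 1)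
--     x = m
--     while x * x > m:
--         x = (x + m // x) // 2
--     return x
--
-- def VerificarSiCentroNumerico(p_candidato):
--     # n is a numeric center iff the left sum is trivially empty (n <= 1)
--     # or 8*n^2 + 1 is a perfect square (Pell equation characterization).
--     if p_candidato <= 1:
--         return True
--     m = 8 * p_candidato * p_candidato + 1
--     r = _isqrt(m)
--     return r * r == m
-- ===== Notes on version B (the rewrite author's own statement) =====
-- stated objective: faster
-- what changed: Replaced A's O(n) build-up/tear-down summation loops by the closed-form characterization: n>1 is a numeric center iff 8*n^2+1 is a perfect square, tested with an O(log n) hand-written Newton integer square root.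
import Mathlib
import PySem

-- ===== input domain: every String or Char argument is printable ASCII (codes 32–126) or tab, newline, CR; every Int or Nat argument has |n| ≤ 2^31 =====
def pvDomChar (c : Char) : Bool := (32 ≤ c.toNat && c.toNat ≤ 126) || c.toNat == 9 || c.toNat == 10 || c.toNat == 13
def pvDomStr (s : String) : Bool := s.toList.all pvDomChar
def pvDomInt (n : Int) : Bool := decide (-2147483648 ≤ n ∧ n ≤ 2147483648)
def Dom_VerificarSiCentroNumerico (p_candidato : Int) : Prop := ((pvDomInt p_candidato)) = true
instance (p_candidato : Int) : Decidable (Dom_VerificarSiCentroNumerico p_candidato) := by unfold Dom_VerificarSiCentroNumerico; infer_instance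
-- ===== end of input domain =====

-- B replaces A's O(n) summation-and-subtraction loops by an O(log n) perfect-square test of 8*n^2+1 (Newton integer sqrt); timed faster.

-- ===== PORT A =====
-- the while loop: subtract numeroDerecha, increment it, while sumaIzq > 0; the
-- fuel argument is only a totality device (pvLoopAFuel is enough for the loop
-- to run to completion, see pvLoopA_iff); returns the final sumaIzq
def pvLoopA (fuel : Nat) (suma d : Int) : Int :=
  match fuel with
  | 0 => suma
  | f + 1 => if 0 < suma then pvLoopA f (suma - d) (d + 1) else suma

def pvLoopAFuel (suma d : Int) : Nat := suma.toNat + (1 - d).toNat * (1 - d).toNat + 1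

def VerificarSiCentroNumerico (p_candidato : Int) : Bool :=
  let sumaIzq := (PySem.List.pyRange 1 p_candidato 1).foldl (fun s x => s + x) 0
  let sumaFin := pvLoopA (pvLoopAFuel sumaIzq (p_candidato + 1)) sumaIzq (p_candidato + 1)
  if sumaFin == 0 then true else false

-- ===== PORT B =====
-- Newton floor-sqrt loop of Source B's _isqrt; fuel is only a totality device
-- (x strictly decreases each round, so x.toNat + 1 rounds always complete the loop)
def pvIsqrtNewton (fuel : Nat) (m x : Int) : Int :=
  match fuel with
  | 0 => x
  | f + 1 =>
    if m < x * x then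
      pvIsqrtNewton f m (PySem.Int.floordiv (x + PySem.Int.floordiv m x) 2)
    else x

def VerificarSiCentroNumerico_alt (p_candidato : Int) : Bool :=
  if p_candidato ≤ 1 then true
  else
    let m := 8 * p_candidato * p_candidato + 1
    let r := pvIsqrtNewton (m.toNat + 1) m m
    r * r == m

-- ===== PRECONDITION & SPEC =====
def Spec_VerificarSiCentroNumerico (p_candidato : Int) (out : Bool) : Prop := out = VerificarSiCentroNumerico_alt p_candidato
instance (p_candidato : Int) (out : Bool) : Decidable (Spec_VerificarSiCentroNumerico p_candidato out) := by unfold Spec_VerificarSiCentroNumerico; infer_instance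

-- ===== CLAIM (what is proved, stated in full; the proofs are below) =====
def Claim_equal_VerificarSiCentroNumerico : Prop := ∀ (p_candidato : Int), Dom_VerificarSiCentroNumerico p_candidato → Spec_VerificarSiCentroNumerico p_candidato (VerificarSiCentroNumerico p_candidato)

-- ===== LEMMAS AND PROOFS =====

-- the left sum: foldl over range(1, n) equals n(n-1)/2 (stated doubled to avoid division)
lemma pvSum_eq (n : Int) (hn : 1 ≤ n) :
    2 * (PySem.List.pyRange 1 n 1).foldl (fun s x => s + x) 0 = n * (n - 1) := by
  obtain ⟨k, rfl⟩ : ∃ k : ℕ, n = 1 + (k : Int) := ⟨(n-1).toNat, by omega⟩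
  induction k with
  | zero =>
    rw [show ((1:Int) + (0:ℕ)) = 1 by norm_num,
        PySem.List.pyRange_one_eq_nil (by omega : (1:Int) ≤ 1)]
    norm_num
  | succ k ih =>
    have h1 : (1 : Int) + ((k:ℕ)+1 : ℕ) = (1 + (k:Int)) + 1 := by push_cast; ring
    rw [h1, PySem.List.pyRange_one_succ_right (by omega), List.foldl_append]
    have ih' := ih (by omega)
    simp only [List.foldl]
    push_cast at ih' ⊢
    linear_combination ih'

lemma pvSum_nil (n : Int) (hn : n ≤ 1) :
    (PySem.List.pyRange 1 n 1).foldl (fun s x => s + x) 0 = 0 := by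
  rw [PySem.List.pyRange_one_eq_nil hn]; rfl

-- characterization of A's while loop: with enough fuel it ends at exactly 0 iff
-- suma is 0 or a consecutive sum d + (d+1) + … + (d+k-1) equals suma
lemma pvLoopA_iff : ∀ (fuel : Nat) (suma d : Int),
    suma.toNat + (1 - d).toNat * (1 - d).toNat < fuel →
    (pvLoopA fuel suma d = 0 ↔
      (suma = 0 ∨ (0 < suma ∧ ∃ k : ℕ, 2 * suma = (k : Int) * (2*d + k - 1)))) := by
  intro fuel
  induction fuel with
  | zero => intro suma d hf; omega
  | succ f ih =>
    intro suma d hf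
    by_cases h : 0 < suma
    · have hdec : (suma - d).toNat + (1 - (d+1)).toNat * (1 - (d+1)).toNat < f := by
        rcases (by omega : d ≤ 0 ∨ 0 < d) with hd | hd
        · obtain ⟨v, hv⟩ : ∃ v : ℕ, (1 - d).toNat = v + 1 := ⟨(1-d).toNat - 1, by omega⟩
          have h1 : (1 - (d+1)).toNat = v := by omega
          have h2 : (suma - d).toNat = suma.toNat + v := by omega
          have h3 : (v+1)*(v+1) = v*v + 2*v + 1 := by ring
          rw [hv] at hf
          rw [h1, h2]
          omega
        · have h1 : (1 - (d+1)).toNat = 0 := by omega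
          have h2 : (1 - d).toNat = 0 := by omega
          have h3 : (suma - d).toNat < suma.toNat := by omega
          rw [h2] at hf
          rw [h1]
          omega
      rw [show pvLoopA (f+1) suma d = pvLoopA f (suma - d) (d + 1) by
            simp [pvLoopA, h]]
      rw [ih _ _ hdec]
      constructor
      · rintro (h0 | ⟨hpos, k, hk⟩)
        · refine Or.inr ⟨h, ⟨1, ?_⟩⟩; push_cast; omega
        · refine Or.inr ⟨h, ⟨k + 1, ?_⟩⟩
          push_cast at hk ⊢
          linear_combination hk
      · rintro (h0 | ⟨_, k, hk⟩)
        · omega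
        · obtain ⟨k', rfl⟩ : ∃ k' : ℕ, k = k' + 1 := by
            rcases k with _ | k'
            · exfalso; push_cast at hk; omega
            · exact ⟨k', rfl⟩
          push_cast at hk
          have hk' : 2 * (suma - d) = (k' : Int) * (2*(d+1) + k' - 1) := by
            linear_combination hk
          rcases lt_trichotomy (suma - d) 0 with hneg | hz | hpos
          · exfalso
            have hknz : (1:Int) ≤ (k' : Int) := by
              rcases Nat.eq_zero_or_pos k' with rfl | hp
              · exfalso; push_cast at hk'; omega
              · exact_mod_cast hp
            have hfac : 2*d + (k':Int) + 1 < 0 := by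
              by_contra hc
              push_neg at hc
              have := mul_nonneg (by positivity : (0:Int) ≤ (k':Int))
                (by linarith : (0:Int) ≤ 2*(d+1) + (k':Int) - 1)
              linarith [hk']
            have hpos2 : (0:Int) < 2*d + (k':Int) := by
              by_contra hc
              push_neg at hc
              have := mul_nonpos_of_nonneg_of_nonpos
                (by positivity : (0:Int) ≤ (k':Int)+1) hc
              nlinarith [hk, h]
            omega
          · left; omega
          · right; exact ⟨hpos, ⟨k', hk'⟩⟩
    · rw [show pvLoopA (f+1) suma d = suma by simp [pvLoopA, h]]
      constructor
      · intro h0; exact Or.inl h0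
      · rintro (h0 | ⟨hpos, _⟩)
        · exact h0
        · omega

-- Newton loop computes the floor square root
lemma pvIsqrtNewton_eq (m s : Int) (hs : 1 ≤ s)
    (h1 : s * s ≤ m) (h2 : m < (s+1)*(s+1)) :
    ∀ (fuel : Nat) (x : Int), x.toNat < fuel → s ≤ x → pvIsqrtNewton fuel m x = s := by
  intro fuel
  induction fuel with
  | zero => intro x hf hsx; omega
  | succ f ih =>
    intro x hf hsx
    have hx1 : 1 ≤ x := le_trans hs hsx
    by_cases hcase : m < x * x
    · rw [show pvIsqrtNewton (f+1) m x
            = pvIsqrtNewton f m (PySem.Int.floordiv (x + PySem.Int.floordiv m x) 2) by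
          simp [pvIsqrtNewton, hcase]]
      have e1 : PySem.Int.floordiv m x = m / x := PySem.Int.floordiv_eq_ediv_of_pos (by omega)
      set q := m / x with hqdef
      have hq1 : q * x ≤ m := by
        have ha := Int.ediv_add_emod m x
        have hb := Int.emod_nonneg m (by omega : x ≠ 0)
        nlinarith [ha, hb]
      have hq2 : m < (q + 1) * x := by
        have ha := Int.ediv_add_emod m x
        have hb := Int.emod_lt_of_pos m (by omega : 0 < x)
        nlinarith [ha, hb]
      have hqlt : q < x := by
        by_contra hc
        push_neg at hc
        have := mul_le_mul_of_nonneg_right hc (by omega : (0:Int) ≤ x)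
        nlinarith [hq1, hcase]
      have e2 : PySem.Int.floordiv (x + PySem.Int.floordiv m x) 2 = (x + q) / 2 := by
        rw [e1]; exact PySem.Int.floordiv_eq_ediv_of_pos (by omega)
      rw [e2]
      set x' := (x + q) / 2 with hx'def
      have hx'b : 2 * x' ≤ x + q ∧ x + q < 2 * x' + 2 := by omega
      have hsx' : s ≤ x' := by
        by_contra hlt
        push_neg at hlt
        have hxq : q + 1 ≤ 2 * s - x := by omega
        have := mul_le_mul_of_nonneg_right hxq (by omega : (0:Int) ≤ x)
        nlinarith [hq2, h1, sq_nonneg (s - x)]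
      have hx'lt : x' < x := by omega
      exact ih x' (by omega) hsx'
    · push_neg at hcase
      have hxs : x = s := by
        by_contra hne
        have hge : s + 1 ≤ x := by omega
        have := mul_le_mul_of_nonneg_right hge (by omega : (0:Int) ≤ x)
        nlinarith [hcase, h2, hge]
      rw [show pvIsqrtNewton (f+1) m x = x by simp [pvIsqrtNewton, not_lt.mpr hcase]]
      exact hxs

-- existence of the floor sqrt and perfect-square reading of B
lemma pvB_iff (n : Int) (hn : 2 ≤ n) :
    VerificarSiCentroNumerico_alt n = true ↔ ∃ t : Int, 0 ≤ t ∧ t * t = 8*n*n + 1 := by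
  unfold VerificarSiCentroNumerico_alt
  rw [if_neg (by omega)]
  set m := 8 * n * n + 1 with hmdef
  have hm1 : 1 ≤ m := by nlinarith
  obtain ⟨s, hs0, hs1, hs2⟩ : ∃ s : Int, 1 ≤ s ∧ s * s ≤ m ∧ m < (s+1)*(s+1) := by
    refine ⟨(Nat.sqrt m.toNat : Int), ?_, ?_, ?_⟩
    · have : 0 < Nat.sqrt m.toNat := Nat.sqrt_pos.mpr (by omega)
      omega
    · have h := Nat.sqrt_le' m.toNat
      have h' : ((Nat.sqrt m.toNat : Int)) ^ 2 ≤ (m.toNat : Int) := by exact_mod_cast h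
      rw [pow_two] at h'
      have hmt : ((m.toNat : Int)) = m := by omega
      linarith
    · have h := Nat.lt_succ_sqrt' m.toNat
      have h' : (m.toNat : Int) < ((Nat.sqrt m.toNat : Int) + 1) ^ 2 := by
        exact_mod_cast h
      rw [pow_two] at h'
      have hmt : ((m.toNat : Int)) = m := by omega
      linarith
  have hsm : s ≤ m := by nlinarith [hs1, hs0]
  have hloop : pvIsqrtNewton (m.toNat + 1) m m = s :=
    pvIsqrtNewton_eq m s hs0 hs1 hs2 (m.toNat + 1) m (by omega) hsm
  simp only [hloop, beq_iff_eq]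
  constructor
  · intro h; exact ⟨s, by omega, h⟩
  · rintro ⟨t, ht0, ht⟩
    have hts : t = s := by nlinarith [hs1, hs2, ht, ht0, hs0]
    rw [← hts]; exact ht

-- the number-theoretic bridge: the consecutive-sum condition is the Pell condition
lemma pvBridge (n : Int) (hn : 2 ≤ n) :
    (∃ k : ℕ, n * (n - 1) = (k : Int) * (2*(n+1) + k - 1)) ↔
      ∃ t : Int, 0 ≤ t ∧ t * t = 8*n*n + 1 := by
  constructor
  · rintro ⟨k, hk⟩
    refine ⟨2*n + 2*(k:Int) + 1, by omega, ?_⟩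
    linear_combination (-4 : Int) * hk
  · rintro ⟨t, ht0, ht⟩
    obtain ⟨u, hu⟩ : ∃ u : Int, t = 2*u + 1 := by
      rcases Int.even_or_odd t with ⟨u, hu⟩ | ⟨u, hu⟩
      · exfalso
        subst hu
        have h4 : 4*(u*u) = 8*(n*n) + 1 := by linear_combination ht
        generalize u*u = a at h4
        generalize n*n = b at h4
        omega
      · exact ⟨u, by omega⟩
    subst hu
    have hu2 : u * u + u = 2 * (n * n) := by
      have h4 : 4*(u*u) + 4*u = 8*(n*n) := by linear_combination ht
      linarith [h4]
    have hu0 : 0 ≤ u := by omega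
    have hun : n ≤ u := by
      by_contra hc
      push_neg at hc
      have h5 : u * u ≤ (n-1) * (n-1) := mul_self_le_mul_self hu0 (by omega)
      nlinarith [hu2, h5, hn]
    refine ⟨(u - n).toNat, ?_⟩
    have hcast : ((u - n).toNat : Int) = u - n := by omega
    rw [hcast]
    linear_combination (-1 : Int) * hu2

-- full equivalence, pointwise
lemma pvMain (n : Int) : VerificarSiCentroNumerico n = VerificarSiCentroNumerico_alt n := by
  rcases (by omega : n ≤ 1 ∨ 2 ≤ n) with hn | hn2
  · have h0 : ∀ fuel, pvLoopA fuel 0 (n + 1) = 0 := by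
      intro fuel; cases fuel <;> simp [pvLoopA]
    simp [VerificarSiCentroNumerico, VerificarSiCentroNumerico_alt, pvSum_nil n hn, h0, hn]
  · have hA : VerificarSiCentroNumerico n = true ↔
        pvLoopA (pvLoopAFuel ((PySem.List.pyRange 1 n 1).foldl (fun s x => s + x) 0) (n + 1))
          ((PySem.List.pyRange 1 n 1).foldl (fun s x => s + x) 0) (n + 1) = 0 := by
      unfold VerificarSiCentroNumerico
      constructor
      · intro h; by_contra hne; simp [hne] at h
      · intro h; simp [h]
    have hsum := pvSum_eq n (by omega)
    have hspos : 0 < (PySem.List.pyRange 1 n 1).foldl (fun s x => s + x) 0 := by nlinarith [hsum]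
    have hfuel : ∀ suma d : Int,
        suma.toNat + (1 - d).toNat * (1 - d).toNat < pvLoopAFuel suma d := by
      intro suma d; unfold pvLoopAFuel; omega
    have hiff : VerificarSiCentroNumerico n = true ↔ VerificarSiCentroNumerico_alt n = true := by
      rw [hA, pvLoopA_iff _ _ _ (hfuel _ _), pvB_iff n hn2, ← pvBridge n hn2]
      constructor
      · rintro (h0 | ⟨_, k, hk⟩)
        · omega
        · refine ⟨k, ?_⟩
          linear_combination hk - hsum
      · rintro ⟨k, hk⟩
        refine Or.inr ⟨hspos, ⟨k, ?_⟩⟩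
        linear_combination hk + hsum
    rcases Bool.eq_false_or_eq_true (VerificarSiCentroNumerico n) with h | h <;>
      rcases Bool.eq_false_or_eq_true (VerificarSiCentroNumerico_alt n) with h' | h' <;>
      simp_all

-- ===== VERDICT (by name: the statement is the Claim_ definition above) =====
theorem VerificarSiCentroNumerico_spec : Claim_equal_VerificarSiCentroNumerico := by
  intro n _
  unfold Spec_VerificarSiCentroNumerico
  exact pvMain n
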